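-- pv_equiv track=rewrite | github.com/royerlraph79/AdGuard | convert_hosts.py | compress_by_subsumption
-- ===== SOURCE A (Python) =====
-- from typing import Iterable, Set, List, Tuple, Optional
--
-- def compress_by_subsumption(domains: Set[str]) -> Tuple[Set[str], int]:
--     """Remove subdomains already covered by a parent rule present in the set."""
--     if not domains:
--         return set(), 0
--     removed = 0
--     keep: Set[str] = set()
--     for d in domains:
--         labels = d.split(".")
--         # If any proper suffix (parent) is present, d is redundant
--         if any(".".join(labels[i:]) in domains for i in range(1, len(labels))):
--             removed += 1
--             continue
--         keep.add(d)
--     return keep, removed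
-- ===== SOURCE B (Python) =====
-- def _has_parent(d, domains):
--     suffix = None
--     for label in reversed(d.split(".")):
--         if suffix is not None and suffix in domains:
--             return True
--         suffix = label if suffix is None else label + "." + suffix
--     return False
--
-- def compress_by_subsumption(domains):
--     """Remove subdomains already covered by a parent rule present in the set."""
--     keep = {d for d in domains if not _has_parent(d, domains)}
--     removed = sum(1 for d in domains if _has_parent(d, domains))
--     return keep, removed
-- ===== Notes on version B (the rewrite author's own statement) =====
-- stated objective: alternative
-- what changed: B replaces A's per-split-point re-join of labels[i:] (a fresh '.'.join for every i) with a single right-to-left walk over the labels that grows each parent suffix incrementally and tests membership as it goes, and it derives keep/removed by two comprehension-style passes instead of A's one stateful loop with a counter.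
import Mathlib
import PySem

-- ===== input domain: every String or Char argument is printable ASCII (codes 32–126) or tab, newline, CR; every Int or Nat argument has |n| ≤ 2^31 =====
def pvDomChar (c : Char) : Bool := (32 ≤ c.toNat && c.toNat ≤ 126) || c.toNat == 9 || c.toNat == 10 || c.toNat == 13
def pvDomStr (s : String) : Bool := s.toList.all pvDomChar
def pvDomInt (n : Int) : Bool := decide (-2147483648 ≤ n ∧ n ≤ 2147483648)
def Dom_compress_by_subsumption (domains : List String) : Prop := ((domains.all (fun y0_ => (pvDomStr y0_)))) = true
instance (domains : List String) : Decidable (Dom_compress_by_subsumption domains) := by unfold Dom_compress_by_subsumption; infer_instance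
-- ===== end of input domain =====

-- B restructures the per-domain subsumption test: instead of re-joining labels[i:] for every i,
-- it builds each proper parent suffix incrementally while walking the labels right-to-left
-- (TLD-first), and derives keep/removed as two comprehension-style passes (objective: alternative).

-- ===== PORT A =====
-- A's inner 'any(".".join(labels[i:]) in domains for i in range(1, len(labels)))'
def subsumedA (domains : List String) (d : String) : Bool :=
  let labels := (PySem.Str.split? d ".").getD []
  (PySem.List.pyRange 1 (labels.length : Int) 1).any
    (fun i => PySem.Set.contains domains (PySem.Str.join "." (PySem.List.slice labels (some i) none)))

def compress_by_subsumption (domains : List String) : List String × Int :=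
  if domains = [] then ([], 0)
  else
    domains.foldl
      (fun st d =>
        if subsumedA domains d then (st.1, st.2 + 1)
        else (PySem.Set.add st.1 d, st.2))
      ([], 0)

-- ===== PORT B =====
-- Source B's `_has_parent` loop over reversed(d.split(".")); `suffix : Option String`,
-- early `return True` becomes the `true` branch of the recursion.
-- String `+` is ported as Lean `++` on String (exact for Python str concatenation).
def hpGo (domains : List String) (suffix : Option String) : List String → Bool
  | [] => false
  | label :: rest =>
    match suffix with
    | none => hpGo domains (some label) rest
    | some s =>
        if PySem.Set.contains domains s then true
        else hpGo domains (some (label ++ "." ++ s)) rest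

def hasParent (d : String) (domains : List String) : Bool :=
  hpGo domains none ((PySem.Str.split? d ".").getD []).reverse

def compress_by_subsumption_alt (domains : List String) : List String × Int :=
  (PySem.Set.ofList (domains.filter (fun d => !hasParent d domains)),
   ((domains.filter (fun d => hasParent d domains)).length : Int))

-- ===== PRECONDITION & SPEC =====
def Spec_compress_by_subsumption (domains : List String) (out : List String × Int) : Prop := out = compress_by_subsumption_alt domains
instance (domains : List String) (out : List String × Int) : Decidable (Spec_compress_by_subsumption domains out) := by unfold Spec_compress_by_subsumption; infer_instance

-- ===== CLAIM (what is proved, stated in full; the proofs are below) =====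
def Claim_equal_compress_by_subsumption : Prop := ∀ (domains : List String), Dom_compress_by_subsumption domains → Spec_compress_by_subsumption domains (compress_by_subsumption domains)

-- ===== LEMMAS AND PROOFS =====

-- the string Source B's loop has accumulated after consuming `t` (more-significant labels, in
-- right-to-left order) on top of the start suffix `s`
def buildStr (t : List String) (s : String) : String :=
  t.foldl (fun acc lab => lab ++ "." ++ acc) s

theorem buildStr_reverse_eq_join (t : List String) (s : String) :
    buildStr t.reverse s = PySem.Str.join "." (t ++ [s]) := by
  induction t with
  | nil =>
      apply String.toList_inj.mp
      simp [buildStr, PySem.Str.toList_join, PySem.Chars.join_singleton]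
  | cons a t' ih =>
      apply String.toList_inj.mp
      have hfold : buildStr (t'.reverse ++ [a]) s = a ++ "." ++ buildStr t'.reverse s := by
        simp [buildStr, List.foldl_append]
      have := congrArg String.toList ih
      simp only [List.reverse_cons, hfold]
      cases t' with
      | nil =>
          simp [buildStr, PySem.Str.toList_join, PySem.Chars.join_cons_cons,
                PySem.Chars.join_singleton]
      | cons b tb =>
          have hdot : ".".toList = ['.'] := rfl
          simp only [PySem.Str.toList_join, List.map_cons, List.cons_append,
                     List.map_append, List.map_nil, hdot, List.reverse_cons] at this ⊢
          rw [PySem.Chars.join_cons_cons]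
          simp [this, hdot]

theorem hpGo_some_iff (domains : List String) (r : List String) (s : String) :
    hpGo domains (some s) r = true ↔
      ∃ k : Nat, k < r.length ∧ buildStr (r.take k) s ∈ domains := by
  induction r generalizing s with
  | nil => simp [hpGo]
  | cons lab rest ih =>
      simp only [hpGo]
      by_cases hmem : s ∈ domains
      · simp only [(PySem.Set.contains_iff domains s).mpr hmem, if_true]
        constructor
        · intro _
          exact ⟨0, by simp, by simpa [buildStr]⟩
        · intro _; trivial
      · have hc : PySem.Set.contains domains s = false := by
          cases h : PySem.Set.contains domains s
          · rfl
          · exact absurd ((PySem.Set.contains_iff domains s).mp h) hmem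
        rw [hc]
        simp only [Bool.false_eq_true, if_false]
        rw [ih]
        constructor
        · rintro ⟨k, hk, hmem'⟩
          refine ⟨k + 1, by simpa using Nat.succ_lt_succ hk, ?_⟩
          simpa [buildStr, List.take_succ_cons] using hmem'
        · rintro ⟨k, hk, hmem'⟩
          cases k with
          | zero => exact absurd (by simpa [buildStr] using hmem') hmem
          | succ k' =>
              refine ⟨k', by simpa using Nat.lt_of_succ_lt_succ hk, ?_⟩
              simpa [buildStr, List.take_succ_cons] using hmem'

-- B's test on an arbitrary label list: some proper tail of `labels`, joined with ".", is in `domains`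
theorem hpGo_reverse_iff (domains : List String) (labels : List String) :
    hpGo domains none labels.reverse = true ↔
      ∃ j : Nat, 1 ≤ j ∧ j < labels.length ∧
        PySem.Str.join "." (labels.drop j) ∈ domains := by
  induction labels using List.reverseRecOn with
  | nil => simp [hpGo]
  | append_singleton mid last _ =>
      have hrev : (mid ++ [last]).reverse = last :: mid.reverse := by simp
      rw [hrev]
      have hstep : hpGo domains none (last :: mid.reverse) = hpGo domains (some last) mid.reverse := rfl
      rw [hstep, hpGo_some_iff]
      constructor
      · rintro ⟨k, hk, hmem⟩
        simp only [List.length_reverse] at hk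
        refine ⟨mid.length - k, by omega, by simp, ?_⟩
        have htake : mid.reverse.take k = (mid.drop (mid.length - k)).reverse := by
          rw [List.take_reverse]
        have hdrop : (mid ++ [last]).drop (mid.length - k) = mid.drop (mid.length - k) ++ [last] := by
          rw [List.drop_append_of_le_length (by omega)]
        rw [hdrop, ← buildStr_reverse_eq_join]
        rwa [htake] at hmem
      · rintro ⟨j, hj1, hj2, hmem⟩
        simp only [List.length_append, List.length_cons, List.length_nil] at hj2
        refine ⟨mid.length - j, ?_, ?_⟩
        · simp only [List.length_reverse]
          omega
        have htake : mid.reverse.take (mid.length - j) = (mid.drop j).reverse := by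
          have h : mid.length - (mid.length - j) = j := by omega
          rw [List.take_reverse, h]
        have hdrop : (mid ++ [last]).drop j = mid.drop j ++ [last] := by
          rw [List.drop_append_of_le_length (by omega)]
        rw [htake, buildStr_reverse_eq_join]
        rwa [hdrop] at hmem

-- A's test on an arbitrary label list is the same proposition
theorem subsumedA_iff (domains : List String) (d : String) :
    subsumedA domains d = true ↔
      ∃ j : Nat, 1 ≤ j ∧ j < ((PySem.Str.split? d ".").getD []).length ∧
        PySem.Str.join "." (((PySem.Str.split? d ".").getD []).drop j) ∈ domains := by
  unfold subsumedA
  rw [List.any_eq_true]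
  constructor
  · rintro ⟨i, hi, hmem⟩
    rw [PySem.List.mem_pyRange_one] at hi
    obtain ⟨hi1, hi2⟩ := hi
    refine ⟨i.toNat, by omega, by omega, ?_⟩
    rw [PySem.List.slice_from _ (by omega)] at hmem
    exact (PySem.Set.contains_iff _ _).mp hmem
  · rintro ⟨j, hj1, hj2, hmem⟩
    refine ⟨(j : Int), ?_, ?_⟩
    · rw [PySem.List.mem_pyRange_one]
      omega
    · rw [PySem.List.slice_from _ (by omega)]
      simpa using (PySem.Set.contains_iff _ _).mpr hmem

theorem subsumedA_eq_hasParent (domains : List String) (d : String) :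
    subsumedA domains d = hasParent d domains := by
  have h := (subsumedA_iff domains d).trans (hpGo_reverse_iff domains ((PySem.Str.split? d ".").getD [])).symm
  unfold hasParent
  cases ha : subsumedA domains d <;> cases hb : hpGo domains none ((PySem.Str.split? d ".").getD []).reverse
  · rfl
  · exact absurd (h.mpr hb) (by simp [ha])
  · exact absurd (h.mp ha) (by simp [hb])
  · rfl

theorem foldA_spec (domains : List String) (l : List String) (acc : List String) (r : Int) :
    l.foldl
      (fun st d =>
        if subsumedA domains d then (st.1, st.2 + 1)
        else (PySem.Set.add st.1 d, st.2))
      (acc, r)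
    = (PySem.Set.update acc (l.filter (fun d => !subsumedA domains d)),
       r + ((l.filter (fun d => subsumedA domains d)).length : Int)) := by
  induction l generalizing acc r with
  | nil => simp [PySem.Set.update]
  | cons d rest ih =>
      simp only [List.foldl_cons]
      cases hd : subsumedA domains d
      · rw [if_neg Bool.false_ne_true, ih,
            List.filter_cons_of_pos (by simp [hd]), List.filter_cons_of_neg (by simp [hd])]
        rfl
      · rw [if_pos rfl, ih,
            List.filter_cons_of_neg (by simp [hd]), List.filter_cons_of_pos (by simp [hd])]
        simp only [List.length_cons, Prod.ext_iff]
        exact ⟨by simp, by push_cast; ring⟩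

-- ===== VERDICT (by name: the statement is the Claim_ definition above) =====
theorem compress_by_subsumption_spec : Claim_equal_compress_by_subsumption := by
  intro domains _
  unfold Spec_compress_by_subsumption compress_by_subsumption compress_by_subsumption_alt
  by_cases hnil : domains = []
  · subst hnil; rfl
  · rw [if_neg hnil, foldA_spec, PySem.Set.update_nil_left]
    have hfilt1 : domains.filter (fun d => !subsumedA domains d)
        = domains.filter (fun d => !hasParent d domains) := by
      apply List.filter_congr
      intro d _
      rw [subsumedA_eq_hasParent]
    have hfilt2 : domains.filter (fun d => subsumedA domains d)
        = domains.filter (fun d => hasParent d domains) := by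
      apply List.filter_congr
      intro d _
      rw [subsumedA_eq_hasParent]
    rw [hfilt1, hfilt2]
    simp
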